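-- pv_equiv track=rewrite | github.com/betasewer/machaon | machaon/_souko/_parser.py | rangelist_to_passagelist
-- ===== SOURCE A (Python) =====
-- from collections import defaultdict
--
-- def rangelist_to_passagelist(string, rangelist):
--     # 座標リストを木構造に変換する
--     range_and_its_righters = defaultdict(list)
--     for r in rangelist:
--         beg, end, _cxt = r
--         range_and_its_righters[beg].append((end, r))
--
--     # 木構造を経路リストに変換する
--     def _walk_tree(rows, head, strend, currow=[], level=0):
--         if level==99:
--             raise ValueError("Maximum Depth Recursion {}, {}".format(head, strend))
--
--         for end, rng in range_and_its_righters[head]: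
--             newrow = currow + [rng]
--             if end == strend:
--                 rows.append(newrow)
--             else:
--                 _walk_tree(rows, end, strend, newrow, level+1)
--
--     passages = []
--     if rangelist:
--         begpoint = min([b for (b,e,_) in rangelist])
--         endpoint = max([e for (b,e,_) in rangelist])
--         _walk_tree(passages, begpoint, endpoint)
--     return passages
-- ===== SOURCE B (Python) =====
-- def rangelist_to_passagelist(string, rangelist):
--     # Bottom-up: return the list of passage suffixes from each head by scanning
--     # rangelist for children on demand, instead of pre-building a beg-indexed
--     # defaultdict and threading (rows, currow) accumulators through the recursion.
--     if not rangelist: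
--         return []
--     begpoint = min(b for b, _, _ in rangelist)
--     strend = max(e for _, e, _ in rangelist)
--
--     def suffixes(head, level):
--         if level == 99:
--             raise ValueError("Maximum Depth Recursion {}, {}".format(head, strend))
--         out = []
--         for r in rangelist:
--             if r[0] != head:
--                 continue
--             if r[1] == strend:
--                 out.append([r])
--             else:
--                 out.extend([r] + p for p in suffixes(r[1], level + 1))
--         return out
--
--     return suffixes(begpoint, 0)
-- ===== Notes on version B (the rewrite author's own statement) =====
-- stated objective: alternative
-- what changed: The beg-indexed defaultdict build pass and the accumulator-mutating _walk_tree recursion are replaced by an index-free bottom-up recursion that returns the list of passage suffixes for each head (scanning rangelist for children on demand) and concatenates them, preserving passage order and the depth-99 ValueError.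
import Mathlib
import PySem

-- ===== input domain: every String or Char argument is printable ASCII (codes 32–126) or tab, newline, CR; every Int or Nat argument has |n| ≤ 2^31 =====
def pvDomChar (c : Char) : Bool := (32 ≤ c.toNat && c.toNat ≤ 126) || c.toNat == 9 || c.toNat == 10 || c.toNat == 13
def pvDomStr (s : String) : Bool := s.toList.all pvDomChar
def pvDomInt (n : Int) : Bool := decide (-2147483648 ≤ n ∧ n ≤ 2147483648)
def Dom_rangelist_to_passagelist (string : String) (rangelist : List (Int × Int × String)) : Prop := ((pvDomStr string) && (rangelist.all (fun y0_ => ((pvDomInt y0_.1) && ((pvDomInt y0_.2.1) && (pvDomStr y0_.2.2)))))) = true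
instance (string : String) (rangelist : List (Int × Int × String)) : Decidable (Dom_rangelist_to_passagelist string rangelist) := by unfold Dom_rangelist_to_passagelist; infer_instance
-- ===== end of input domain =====

-- B replaces the beg-indexed defaultdict + accumulator-mutating recursion of A by an
-- index-free bottom-up recursion returning the passage suffixes of each head (alternative
-- decomposition, same passage order and the same depth-99 ValueError).

-- ===== PORT A =====
-- range_and_its_righters: defaultdict(list); r appended to the key beg as (end, r)
def pvTreeA (rangelist : List (Int × Int × String)) :
    PySem.Dict Int (List (Int × (Int × Int × String))) :=
  rangelist.foldl
    (fun d r => PySem.Dict.insert d r.1 (PySem.Dict.getD d r.1 [] ++ [(r.2.1, r)]))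
    PySem.Dict.empty

-- _walk_tree, with fuel = 99 - level (Python checks level == 99 ⟺ fuel = 0, where it
-- raises ValueError; those inputs are excluded by Pre_ below, the port returns rows there)
def pvWalkA (tree : PySem.Dict Int (List (Int × (Int × Int × String)))) (strend : Int) :
    Nat → List (List (Int × Int × String)) → Int → List (Int × Int × String) →
    List (List (Int × Int × String))
  | 0, rows, _, _ => rows
  | f + 1, rows, head, currow =>
    (PySem.Dict.getD tree head []).foldl
      (fun rows er =>
        if er.1 = strend then rows ++ [currow ++ [er.2]]
        else pvWalkA tree strend f rows er.1 (currow ++ [er.2]))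
      rows

def rangelist_to_passagelist (string : String) (rangelist : List (Int × Int × String)) :
    List (List (Int × Int × String)) :=
  let tree := pvTreeA rangelist
  if rangelist.isEmpty then []
  else
    match PySem.List.min? (rangelist.map (fun r => r.1)) (fun x => x),
          PySem.List.max? (rangelist.map (fun r => r.2.1)) (fun x => x) with
    | some begpoint, some endpoint => pvWalkA tree endpoint 99 [] begpoint []
    | _, _ => []    -- unreachable: rangelist ≠ []

-- ===== PORT B =====
-- suffixes(head, level): the list of passages from head to strend, children found by
-- scanning rangelist; fuel = 99 - level (fuel 0 is the ValueError, excluded by Pre_,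
-- where the port returns [])
def pvSuffixes (rangelist : List (Int × Int × String)) (strend : Int) :
    Nat → Int → List (List (Int × Int × String))
  | 0, _ => []
  | f + 1, head =>
    rangelist.foldl
      (fun out r =>
        if r.1 ≠ head then out
        else if r.2.1 = strend then out ++ [[r]]
        else out ++ (pvSuffixes rangelist strend f r.2.1).map (fun p => r :: p))
      []

def rangelist_to_passagelist_alt (string : String) (rangelist : List (Int × Int × String)) :
    List (List (Int × Int × String)) :=
  if rangelist.isEmpty then []
  else
    match PySem.List.min? (rangelist.map (fun r => r.1)) (fun x => x) with
    | none => []    -- unreachable: rangelist ≠ []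
    | some begpoint =>
      match PySem.List.max? (rangelist.map (fun r => r.2.1)) (fun x => x) with
      | none => []    -- unreachable: rangelist ≠ []
      | some strend => pvSuffixes rangelist strend 99 begpoint

-- ===== PRECONDITION & SPEC =====
-- one iteration of reachability: the ends (≠ strend) of ranges starting in S
def pvStep (rangelist : List (Int × Int × String)) (strend : Int) (S : List Int) : List Int :=
  (rangelist.filter (fun r => S.contains r.1 && r.2.1 != strend)).map (fun r => r.2.1)

def pvIter (rangelist : List (Int × Int × String)) (strend : Int) :
    Nat → List Int → List Int
  | 0, S => S
  | k + 1, S => if S.isEmpty then [] else pvIter rangelist strend k (pvStep rangelist strend S)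

-- Pre_ excludes EXACTLY the inputs on which A raises its ValueError (both Pythons raise
-- there): those whose ranges admit a chain of 99 links from the minimal start whose ends
-- all differ from the maximal end, i.e. the set of heads reachable in 99 non-terminal
-- steps is nonempty.
def Pre_rangelist_to_passagelist (string : String) (rangelist : List (Int × Int × String)) : Prop :=
  (rangelist.isEmpty ||
    (pvIter rangelist
        ((PySem.List.max? (rangelist.map (fun r => r.2.1)) (fun x => x)).getD 0) 99
        [(PySem.List.min? (rangelist.map (fun r => r.1)) (fun x => x)).getD 0]).isEmpty) = true
instance (string : String) (rangelist : List (Int × Int × String)) : Decidable (Pre_rangelist_to_passagelist string rangelist) := by unfold Pre_rangelist_to_passagelist; infer_instance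

def pvWitness_rangelist_to_passagelist : String × (List (Int × Int × String)) :=
  ("ab", [(0, 1, "x"), (1, 2, "y")])

def Spec_rangelist_to_passagelist (string : String) (rangelist : List (Int × Int × String)) (out : List (List (Int × Int × String))) : Prop := out = rangelist_to_passagelist_alt string rangelist
instance (string : String) (rangelist : List (Int × Int × String)) (out : List (List (Int × Int × String))) : Decidable (Spec_rangelist_to_passagelist string rangelist out) := by unfold Spec_rangelist_to_passagelist; infer_instance

-- ===== CLAIM (what is proved, stated in full; the proofs are below) =====
def Claim_equal_rangelist_to_passagelist : Prop := ∀ (string : String) (rangelist : List (Int × Int × String)), Dom_rangelist_to_passagelist string rangelist → Pre_rangelist_to_passagelist string rangelist → Spec_rangelist_to_passagelist string rangelist (rangelist_to_passagelist string rangelist)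

-- ===== LEMMAS AND PROOFS =====

-- children of head in the tree: the ranges starting at head, in list order
def pvChildren (rangelist : List (Int × Int × String)) (h : Int) :
    List (Int × (Int × Int × String)) :=
  (rangelist.filter (fun r => r.1 = h)).map (fun r => (r.2.1, r))

theorem pvTreeA_getD_aux (h : Int) :
    ∀ (rangelist : List (Int × Int × String))
      (d : PySem.Dict Int (List (Int × (Int × Int × String)))),
    PySem.Dict.getD (rangelist.foldl
      (fun d r => PySem.Dict.insert d r.1 (PySem.Dict.getD d r.1 [] ++ [(r.2.1, r)])) d) h []
      = PySem.Dict.getD d h [] ++ pvChildren rangelist h := by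
  intro rangelist
  induction rangelist with
  | nil => intro d; simp [pvChildren]
  | cons r t ih =>
    intro d
    rw [List.foldl_cons, ih]
    by_cases hr : r.1 = h
    · subst hr
      rw [PySem.Dict.getD_insert_self]
      simp [pvChildren]
    · rw [PySem.Dict.getD_insert_of_ne _ _ _ (fun e => hr e.symm)]
      simp [pvChildren, hr]

theorem pvTreeA_getD (rangelist : List (Int × Int × String)) (h : Int) :
    PySem.Dict.getD (pvTreeA rangelist) h [] = pvChildren rangelist h := by
  rw [pvTreeA, pvTreeA_getD_aux]; rfl

-- the list of path suffixes from head (the value both recursions compute)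
def pvPaths (tree : PySem.Dict Int (List (Int × (Int × Int × String)))) (strend : Int) :
    Nat → Int → List (List (Int × Int × String))
  | 0, _ => []
  | f + 1, h =>
    (PySem.Dict.getD tree h []).flatMap
      (fun er =>
        if er.1 = strend then [[er.2]]
        else (pvPaths tree strend f er.1).map (fun p => er.2 :: p))

-- the DFS from h never reaches the fuel-0 (= level-99) guard
def pvSafe (tree : PySem.Dict Int (List (Int × (Int × Int × String)))) (strend : Int) :
    Nat → Int → Prop
  | 0, _ => False
  | f + 1, h => ∀ er ∈ PySem.Dict.getD tree h [], er.1 ≠ strend → pvSafe tree strend f er.1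

theorem pvWalkA_eq (tree : PySem.Dict Int (List (Int × (Int × Int × String)))) (strend : Int) :
    ∀ (f : Nat) (h : Int), pvSafe tree strend f h →
      ∀ (rows : List (List (Int × Int × String))) (currow : List (Int × Int × String)),
        pvWalkA tree strend f rows h currow
          = rows ++ (pvPaths tree strend f h).map (fun p => currow ++ p) := by
  intro f
  induction f with
  | zero => intro h hs; exact absurd hs (by simp [pvSafe])
  | succ f ih =>
    intro h hs rows currow
    rw [pvWalkA, pvPaths]
    have hmem : ∀ er ∈ PySem.Dict.getD tree h [], er.1 ≠ strend → pvSafe tree strend f er.1 := hs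
    revert hmem
    generalize PySem.Dict.getD tree h [] = l
    intro hmem
    induction l generalizing rows with
    | nil => simp
    | cons a t iht =>
      rw [List.foldl_cons, List.flatMap_cons, List.map_append]
      by_cases ha : a.1 = strend
      · rw [if_pos ha, if_pos ha, iht _ (fun er he => hmem er (List.mem_cons_of_mem _ he))]
        simp
      · rw [if_neg ha, if_neg ha,
            ih a.1 (hmem a List.mem_cons_self ha),
            iht _ (fun er he => hmem er (List.mem_cons_of_mem _ he))]
        simp [List.append_assoc]

-- the B fold over any list, as acc ++ flatMap over the filtered-and-tagged children
theorem pvFoldB (S : Int → List (List (Int × Int × String))) (strend h : Int) :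
    ∀ (l : List (Int × Int × String)) (acc : List (List (Int × Int × String))),
      l.foldl
        (fun out r =>
          if r.1 ≠ h then out
          else if r.2.1 = strend then out ++ [[r]]
          else out ++ (S r.2.1).map (fun p => r :: p))
        acc
      = acc ++ (pvChildren l h).flatMap
          (fun er =>
            if er.1 = strend then [[er.2]]
            else (S er.1).map (fun p => er.2 :: p)) := by
  intro l
  induction l with
  | nil => intro acc; simp [pvChildren]
  | cons r t ih =>
    intro acc
    rw [List.foldl_cons]
    by_cases hr : r.1 = h
    · by_cases he : r.2.1 = strend
      · rw [if_neg (by simp [hr]), if_pos he, ih]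
        simp [pvChildren, hr, he]
      · rw [if_neg (by simp [hr]), if_neg he, ih]
        simp [pvChildren, hr, he, List.append_assoc]
    · rw [if_pos (by simp [hr]), ih]
      simp [pvChildren, hr]

theorem pvSuffixes_eq (rangelist : List (Int × Int × String)) (strend : Int) :
    ∀ (f : Nat) (h : Int),
      pvSuffixes rangelist strend f h = pvPaths (pvTreeA rangelist) strend f h := by
  intro f
  induction f with
  | zero => intro h; rfl
  | succ f ih =>
    intro h
    rw [pvSuffixes, pvPaths, pvTreeA_getD, pvFoldB]
    rw [List.nil_append]
    apply List.flatMap_congr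
    intro er _
    by_cases he : er.1 = strend
    · rw [if_pos he, if_pos he]
    · rw [if_neg he, if_neg he, ih]

theorem pvSafe_of_iter (rangelist : List (Int × Int × String)) (strend : Int) :
    ∀ (f : Nat) (S : List Int), pvIter rangelist strend f S = [] →
      ∀ h ∈ S, pvSafe (pvTreeA rangelist) strend f h := by
  intro f
  induction f with
  | zero =>
    intro S hS h hh
    rw [pvIter] at hS
    subst hS
    cases hh
  | succ f ih =>
    intro S hS h hh
    have hSne : ¬ S.isEmpty := by
      intro he
      rw [List.isEmpty_iff] at he
      subst he
      cases hh
    rw [pvIter, if_neg hSne] at hS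
    rw [pvSafe]
    intro er hmem hne
    rw [pvTreeA_getD] at hmem
    simp only [pvChildren, List.mem_map, List.mem_filter, decide_eq_true_eq] at hmem
    obtain ⟨r, ⟨hrmem, hrb⟩, rfl⟩ := hmem
    apply ih (pvStep rangelist strend S) hS
    simp only [pvStep, List.mem_map, List.mem_filter, Bool.and_eq_true, bne_iff_ne]
    exact ⟨r, ⟨hrmem, by
      refine ⟨?_, hne⟩
      rw [List.contains_iff_mem]
      rw [hrb]; exact hh⟩, rfl⟩

-- ===== VERDICT (by name: the statement is the Claim_ definition above) =====
theorem rangelist_to_passagelist_spec : Claim_equal_rangelist_to_passagelist := by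
  intro string rangelist _hdom hpre
  unfold Spec_rangelist_to_passagelist
  rw [rangelist_to_passagelist, rangelist_to_passagelist_alt]
  by_cases hnil : rangelist.isEmpty
  · simp [hnil]
  · rw [if_neg hnil, if_neg hnil]
    have hne : rangelist ≠ [] := by simpa [List.isEmpty_iff] using hnil
    obtain ⟨beg, hbeg⟩ : ∃ b, PySem.List.min? (rangelist.map (fun r => r.1)) (fun x => x)
        = some b := by
      cases hmin : PySem.List.min? (rangelist.map (fun r => r.1)) (fun x => x) with
      | none => exact absurd (by simpa using (PySem.List.min?_eq_none_iff _ _).1 hmin) hne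
      | some b => exact ⟨b, rfl⟩
    obtain ⟨endp, hend⟩ : ∃ e, PySem.List.max? (rangelist.map (fun r => r.2.1)) (fun x => x)
        = some e := by
      cases hmax : PySem.List.max? (rangelist.map (fun r => r.2.1)) (fun x => x) with
      | none => exact absurd (by simpa using (PySem.List.max?_eq_none_iff _ _).1 hmax) hne
      | some e => exact ⟨e, rfl⟩
    rw [hbeg, hend]
    unfold Pre_rangelist_to_passagelist at hpre
    rw [hbeg, hend] at hpre
    have hempty : pvIter rangelist endp 99 [beg] = [] := by
      rcases Bool.or_eq_true_iff.1 hpre with h | h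
      · exact absurd h hnil
      · simpa [List.isEmpty_iff] using h
    have hsafe : pvSafe (pvTreeA rangelist) endp 99 beg :=
      pvSafe_of_iter rangelist endp 99 [beg] hempty beg (by simp)
    show pvWalkA (pvTreeA rangelist) endp 99 [] beg [] = pvSuffixes rangelist endp 99 beg
    rw [pvWalkA_eq (pvTreeA rangelist) endp 99 beg hsafe [] [], pvSuffixes_eq]
    simp
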